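-- pv_equiv track=rewrite | github.com/Miha258/labs | task4/main.py | is_valid_identifier
-- ===== SOURCE A (Python) =====
-- def is_valid_identifier(s):
--     # Перевірка, чи стрічка не містить пробіли
--     if ' ' in s:
--         return False
--
--     # Перевірка, чи стрічка не містить цифр
--     has_digit = False
--     for char in s:
--         if char.isdigit():
--             has_digit = True
--             break
--     if has_digit:
--         return False
--
--     # Перевірка, чи стрічка складається лише з літер та нижнього підкреслення
--     for char in s:
--         if not (char.isalpha() or char == '_'):
--             return False
--
--     # Перевірка, чи стрічка не містить лише нижній або верхній регістр літер
--     if s.islower() or s.isupper():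
--         return False
--
--     # Якщо всі перевірки успішні, повертаємо True
--     return True
-- ===== SOURCE B (Python) =====
-- def is_valid_identifier(s):
--     all_valid = True
--     has_lower = False
--     has_upper = False
--     for ch in s:
--         if not (ch.isalpha() or ch == '_'):
--             all_valid = False
--         if ch.islower():
--             has_lower = True
--         if ch.isupper():
--             has_upper = True
--     return all_valid and has_lower == has_upper
-- ===== Notes on version B (the rewrite author's own statement) =====
-- stated objective: simpler
-- what changed: Replaces A's four separate scans (space membership, digit scan, validity scan, islower/isupper) with one pass keeping three boolean flags and a final flag comparison; the space and digit checks disappear because such characters already fail the alpha-or-underscore flag.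
import Mathlib
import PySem

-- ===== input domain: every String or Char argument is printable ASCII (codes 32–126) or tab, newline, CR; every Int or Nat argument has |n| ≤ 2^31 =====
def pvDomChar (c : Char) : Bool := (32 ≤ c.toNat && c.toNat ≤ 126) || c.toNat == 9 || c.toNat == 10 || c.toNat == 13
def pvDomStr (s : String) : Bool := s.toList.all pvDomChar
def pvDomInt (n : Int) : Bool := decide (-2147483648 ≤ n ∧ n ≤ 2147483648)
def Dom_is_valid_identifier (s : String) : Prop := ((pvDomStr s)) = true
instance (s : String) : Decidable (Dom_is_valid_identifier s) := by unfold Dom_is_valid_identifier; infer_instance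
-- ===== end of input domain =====

-- B is one flag-tracking pass (all-valid / has-lower / has-upper) replacing A's four separate scans; objective: simpler.

-- ===== PORT A =====
-- the 'for char in s: if char.isdigit(): has_digit = True; break' loop
def pvAHasDigit : List Char → Bool
  | [] => false
  | c :: cs => if PySem.Chars.isdigit c then true else pvAHasDigit cs

-- the 'for char in s: if not (char.isalpha() or char == "_"): return False' loop
def pvAAllValid : List Char → Bool
  | [] => true
  | c :: cs => if !(PySem.Chars.isalpha c || c == '_') then false else pvAAllValid cs

-- hand port of str.islower / str.isupper (no PySem primitive): at least one cased char and
-- no char of the other case; exact on ASCII, where cased = islower ∨ isupper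
def pvStrIslower (cs : List Char) : Bool := cs.any PySem.Chars.islower && !cs.any PySem.Chars.isupper
def pvStrIsupper (cs : List Char) : Bool := cs.any PySem.Chars.isupper && !cs.any PySem.Chars.islower

def is_valid_identifier (s : String) : Bool :=
  if PySem.Str.isIn " " s then false
  else if pvAHasDigit s.toList then false
  else if !pvAAllValid s.toList then false
  else if pvStrIslower s.toList || pvStrIsupper s.toList then false
  else true

-- ===== PORT B =====
def is_valid_identifier_alt (s : String) : Bool :=
  let st := s.toList.foldl
    (fun (st : Bool × Bool × Bool) c =>
      (st.1 && (PySem.Chars.isalpha c || c == '_'),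
       st.2.1 || PySem.Chars.islower c,
       st.2.2 || PySem.Chars.isupper c))
    (true, false, false)
  st.1 && (st.2.1 == st.2.2)

-- ===== PRECONDITION & SPEC =====
def Spec_is_valid_identifier (s : String) (out : Bool) : Prop := out = is_valid_identifier_alt s
instance (s : String) (out : Bool) : Decidable (Spec_is_valid_identifier s out) := by unfold Spec_is_valid_identifier; infer_instance

-- ===== CLAIM (what is proved, stated in full; the proofs are below) =====
def Claim_equal_is_valid_identifier : Prop := ∀ (s : String), Dom_is_valid_identifier s → Spec_is_valid_identifier s (is_valid_identifier s)

-- ===== LEMMAS AND PROOFS =====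

theorem pvAHasDigit_eq_any (cs : List Char) : pvAHasDigit cs = cs.any PySem.Chars.isdigit := by
  induction cs with
  | nil => rfl
  | cons c cs ih => simp [pvAHasDigit, ih]

theorem pvAAllValid_eq_all (cs : List Char) :
    pvAAllValid cs = cs.all (fun c => PySem.Chars.isalpha c || c == '_') := by
  induction cs with
  | nil => rfl
  | cons c cs ih =>
    unfold pvAAllValid
    cases h : (PySem.Chars.isalpha c || c == '_') <;> simp [h, ih]

theorem pvFoldl_flags (cs : List Char) (a l u : Bool) :
    cs.foldl
      (fun (st : Bool × Bool × Bool) c =>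
        (st.1 && (PySem.Chars.isalpha c || c == '_'),
         st.2.1 || PySem.Chars.islower c,
         st.2.2 || PySem.Chars.isupper c))
      (a, l, u)
    = (a && cs.all (fun c => PySem.Chars.isalpha c || c == '_'),
       l || cs.any PySem.Chars.islower,
       u || cs.any PySem.Chars.isupper) := by
  induction cs generalizing a l u with
  | nil => simp
  | cons c cs ih => simp [List.foldl_cons, ih, Bool.and_assoc, Bool.or_assoc]

theorem pvDigit_not_valid (c : Char) (h : PySem.Chars.isdigit c = true) :
    (PySem.Chars.isalpha c || c == '_') = false := by
  simp [PySem.Chars.isdigit, PySem.Chars.isalpha, PySem.Chars.islower, PySem.Chars.isupper,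
    Char.le_def] at *
  revert h
  simp [UInt32.le_iff_toNat_le, Char.ext_iff, UInt32.ext_iff]
  omega

-- ===== VERDICT (by name: the statement is the Claim_ definition above) =====
theorem is_valid_identifier_spec : Claim_equal_is_valid_identifier := by
  intro s _
  unfold Spec_is_valid_identifier is_valid_identifier is_valid_identifier_alt
  rw [pvFoldl_flags]
  simp only [Bool.false_or, Bool.true_and]
  by_cases hsp : PySem.Str.isIn " " s = true
  · have hmem : ' ' ∈ s.toList := by
      have h := (PySem.Str.isIn_iff_infix " " s).mp hsp
      exact h.subset (by simp)
    have hall : s.toList.all (fun c => PySem.Chars.isalpha c || c == '_') = false :=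
      List.all_eq_false.mpr ⟨' ', hmem, by decide⟩
    rw [PySem.Str.isIn_eq] at hsp
    have hsp' : PySem.Chars.isIn [' '] s.toList = true := hsp
    simp [hsp', hall]
  · by_cases hd : pvAHasDigit s.toList = true
    · rw [pvAHasDigit_eq_any] at hd
      obtain ⟨c, hc, hcd⟩ := List.any_eq_true.mp hd
      have hall : s.toList.all (fun c => PySem.Chars.isalpha c || c == '_') = false :=
        List.all_eq_false.mpr ⟨c, hc, by simp [pvDigit_not_valid c hcd]⟩
      simp [pvAHasDigit_eq_any, hd, hall]
    · by_cases hv : pvAAllValid s.toList = true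
      · have hall := (pvAAllValid_eq_all s.toList) ▸ hv
        simp only [hsp, Bool.false_eq_true, if_false, hd, hv, Bool.not_true, hall, Bool.true_and]
        unfold pvStrIslower pvStrIsupper
        cases hL : s.toList.any PySem.Chars.islower <;>
          cases hU : s.toList.any PySem.Chars.isupper <;> simp
      · have hall : s.toList.all (fun c => PySem.Chars.isalpha c || c == '_') = false := by
          rw [pvAAllValid_eq_all] at hv
          exact Bool.not_eq_true _ ▸ (Bool.eq_false_iff.mpr hv)
        have hv' : pvAAllValid s.toList = false := Bool.eq_false_iff.mpr hv
        simp [hd, hv', hall]
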